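-- pv_equiv track=rewrite | github.com/HatemAHMED80/kickstat | legacy/ml/form.py | _calculate_unbeaten_run
-- ===== SOURCE A (Python) =====
-- def _calculate_unbeaten_run(results: list[str]) -> int:
--     """Count consecutive matches without a loss."""
--     count = 0
--     for r in results:
--         if r != "L":
--             count += 1
--         else:
--             break
--     return count
-- ===== SOURCE B (Python) =====
-- def _calculate_unbeaten_run(results: list[str]) -> int:
--     """Count consecutive matches without a loss."""
--     # Fold over the list back-to-front: a loss resets the run, anything else
--     # extends it; after the leftmost element the accumulator is the length of
--     # the leading loss-free prefix.
--     run = 0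
--     for r in reversed(results):
--         run = 0 if r == "L" else run + 1
--     return run
-- ===== Notes on version B (the rewrite author's own statement) =====
-- stated objective: alternative
-- what changed: Instead of a forward scan that stops at the first loss, B folds over the list back-to-front with a reset accumulator (run = 0 on "L", run+1 otherwise); the value after the leftmost element is the leading loss-free prefix length. No early exit and the opposite traversal order.
import Mathlib
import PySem

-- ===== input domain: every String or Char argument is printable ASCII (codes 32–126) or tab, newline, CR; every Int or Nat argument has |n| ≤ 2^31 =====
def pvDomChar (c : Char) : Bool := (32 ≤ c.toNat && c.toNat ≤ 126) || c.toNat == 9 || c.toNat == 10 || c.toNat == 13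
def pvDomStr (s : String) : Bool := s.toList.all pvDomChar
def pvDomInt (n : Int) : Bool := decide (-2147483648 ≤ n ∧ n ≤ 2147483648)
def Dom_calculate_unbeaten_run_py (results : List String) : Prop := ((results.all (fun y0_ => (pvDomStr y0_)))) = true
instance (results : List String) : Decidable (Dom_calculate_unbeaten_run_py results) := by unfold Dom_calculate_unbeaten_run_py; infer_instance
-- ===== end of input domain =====

-- B replaces A's forward scan with early break by a back-to-front fold with a
-- reset accumulator (a loss resets the run, anything else extends it) — an
-- alternative decomposition of the same O(n) task.


-- ===== PORT A =====
-- A: 'count = 0; for r in results: if r != "L": count += 1 else: break; return count'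
-- (the broken-out-of for-loop becomes structural recursion that stops at the first "L")
def calculate_unbeaten_run_py : List String → Int
  | [] => 0
  | r :: rest => if r ≠ "L" then calculate_unbeaten_run_py rest + 1 else 0

-- ===== PORT B =====
-- B: 'run = 0; for r in reversed(results): run = 0 if r == "L" else run + 1; return run'
def calculate_unbeaten_run_py_alt (results : List String) : Int :=
  results.reverse.foldl (fun run r => if r == "L" then 0 else run + 1) 0

-- ===== PRECONDITION & SPEC =====
def Spec_calculate_unbeaten_run_py (results : List String) (out : Int) : Prop := out = calculate_unbeaten_run_py_alt results
instance (results : List String) (out : Int) : Decidable (Spec_calculate_unbeaten_run_py results out) := by unfold Spec_calculate_unbeaten_run_py; infer_instance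

-- ===== CLAIM =====
def Claim_equal_calculate_unbeaten_run_py : Prop := ∀ (results : List String), Dom_calculate_unbeaten_run_py results → Spec_calculate_unbeaten_run_py results (calculate_unbeaten_run_py results)

-- ===== LEMMAS AND PROOFS =====
theorem alt_cons (r : String) (rest : List String) :
    calculate_unbeaten_run_py_alt (r :: rest) =
      if r == "L" then 0 else calculate_unbeaten_run_py_alt rest + 1 := by
  simp [calculate_unbeaten_run_py_alt, List.foldl_append]

theorem calc_run_eq (results : List String) :
    calculate_unbeaten_run_py results = calculate_unbeaten_run_py_alt results := by
  induction results with
  | nil => rfl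
  | cons r rest ih =>
    rw [alt_cons]
    by_cases h : r = "L" <;> simp [calculate_unbeaten_run_py, h, ih]

-- ===== VERDICT =====
theorem calculate_unbeaten_run_py_spec : Claim_equal_calculate_unbeaten_run_py := by
  intro results _
  exact calc_run_eq results
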